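-- pv_equiv track=rewrite | github.com/kyuhunsim/algorithm | BOJ(Baekjoon_Online_Judge)/greedy/1343.py | cover_board
-- ===== SOURCE A (Python) =====
-- def cover_board(board):
--     # '.'으로 나누어 X로 이루어진 덩어리들을 얻음
--     parts = board.split('.')
--
--     result = []
--
--     for part in parts:
--         if not part:  # 빈 문자열은 무시 (중간의 '.'은 고려하지 않음)
--             result.append('')
--             continue
--
--         # 'AAAA'로 최대한 채우고 남은 부분을 'BB'로 채움
--         n = len(part)
--         if n % 2 == 1:  # X의 길이가 홀수면 덮을 수 없음
--             return '-1'
--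
--         # 'AAAA'로 최대한 채우기
--         result.append('AAAA' * (n // 4))
--
--         # 나머지를 'BB'로 채우기
--         n = n % 4
--         if n == 2:
--             result[-1] += 'BB'  # 기존에 추가된 문자열에 이어 붙이기
--
--     # 각 부분을 '.'을 기준으로 다시 합침
--     return '.'.join(result)
-- ===== SOURCE B (Python) =====
-- def _tiles(run):
--     return 'AAAA' * (run // 4) + ('BB' if run % 4 == 2 else '')
--
--
-- def cover_board(board):
--     pieces = []
--     run = 0
--     for ch in board:
--         if ch == '.':
--             if run % 2 == 1:
--                 return '-1'
--             pieces.append(_tiles(run))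
--             pieces.append('.')
--             run = 0
--         else:
--             run += 1
--     if run % 2 == 1:
--         return '-1'
--     pieces.append(_tiles(run))
--     return ''.join(pieces)
-- ===== Notes on version B (the rewrite author's own statement) =====
-- stated objective: alternative
-- what changed: Replaces split('.')+per-part loop+'.'.join with a single left-to-right character scan that keeps a running count of consecutive non-'.' characters and flushes tiles (and the literal '.') into an output buffer at each dot and at the end.
import Mathlib
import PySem

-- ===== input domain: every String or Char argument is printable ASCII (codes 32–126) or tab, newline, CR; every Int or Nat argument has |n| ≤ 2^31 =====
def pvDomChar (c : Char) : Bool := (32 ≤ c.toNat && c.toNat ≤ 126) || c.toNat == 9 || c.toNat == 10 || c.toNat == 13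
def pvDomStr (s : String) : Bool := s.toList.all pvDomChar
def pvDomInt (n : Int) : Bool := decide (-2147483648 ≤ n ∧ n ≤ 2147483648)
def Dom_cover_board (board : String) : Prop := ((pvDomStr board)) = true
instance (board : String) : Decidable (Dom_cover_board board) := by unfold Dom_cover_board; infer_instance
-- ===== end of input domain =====

-- B rebuilds the output in one left-to-right scan with a running run-length counter instead of split('.') + join; same return value, no speed claim.

-- ===== PORT A =====
-- 'AAAA' * n  (string repetition; exact: n copies concatenated)
def pvRep (s : List Char) (n : Nat) : List Char := (List.replicate n s).flatten

-- the 'for part in parts' loop of A, carrying the 'result' list; none = the 'return -1' path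
def coverALoop : List (List Char) → List (List Char) → Option (List (List Char))
  | result, [] => some result
  | result, part :: parts =>
    if part = [] then coverALoop (result ++ [[]]) parts
    else
      let n := part.length
      if n % 2 = 1 then none
      else
        let entry := pvRep ['A', 'A', 'A', 'A'] (n / 4)
        let n2 := n % 4
        let entry := if n2 = 2 then entry ++ ['B', 'B'] else entry
        coverALoop (result ++ [entry]) parts

def cover_board (board : String) : String :=
  match coverALoop [] (PySem.Chars.splitOn board.toList ['.']) with
  | none => "-1"
  | some result => String.mk (PySem.Chars.join ['.'] result)

-- ===== PORT B =====
-- _tiles(run) = 'AAAA' * (run // 4) + ('BB' if run % 4 == 2 else '')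
def tilesB (run : Nat) : List Char :=
  pvRep ['A', 'A', 'A', 'A'] (run / 4) ++ (if run % 4 = 2 then ['B', 'B'] else [])

-- the 'for ch in board' loop of B, carrying 'pieces' and the running count 'run'
def coverBLoop : List Char → List (List Char) → Nat → Option (List (List Char))
  | [], pieces, run =>
      if run % 2 = 1 then none else some (pieces ++ [tilesB run])
  | c :: cs, pieces, run =>
      if c = '.' then
        if run % 2 = 1 then none
        else coverBLoop cs ((pieces ++ [tilesB run]) ++ [['.']]) 0
      else coverBLoop cs pieces (run + 1)

def cover_board_alt (board : String) : String :=
  match coverBLoop board.toList [] 0 with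
  | none => "-1"
  | some pieces => String.mk (PySem.Chars.join [] pieces)

-- ===== PRECONDITION & SPEC =====
def Spec_cover_board (board : String) (out : String) : Prop := out = cover_board_alt board
instance (board : String) (out : String) : Decidable (Spec_cover_board board out) := by unfold Spec_cover_board; infer_instance

-- ===== CLAIM (what is proved, stated in full; the proofs are below) =====
def Claim_equal_cover_board : Prop := ∀ (board : String), Dom_cover_board board → Spec_cover_board board (cover_board board)

-- ===== LEMMAS AND PROOFS =====

-- a simple structural recursion equal to board.split('.'): 'pre' is the current (un-reversed) piece
def pvSod : List Char → List Char → List (List Char)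
  | pre, [] => [pre]
  | pre, c :: rest => if c = '.' then pre :: pvSod [] rest else pvSod (pre ++ [c]) rest

lemma sod_dot (pre rest : List Char) : pvSod pre ('.' :: rest) = pre :: pvSod [] rest := by
  simp [pvSod]

lemma sod_nondot (pre rest : List Char) {c : Char} (hc : c ≠ '.') :
    pvSod pre (c :: rest) = pvSod (pre ++ [c]) rest := by
  simp [pvSod, hc]

lemma go_spec : ∀ (fuel : Nat) (l cur : List Char) (acc : List (List Char)),
    l.length ≤ fuel →
    PySem.Chars.splitOn.go ['.'] fuel l cur acc = acc.reverse ++ pvSod cur.reverse l := by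
  intro fuel
  induction fuel with
  | zero =>
    intro l cur acc h
    have : l = [] := List.eq_nil_of_length_eq_zero (Nat.le_zero.mp h)
    subst this
    simp [PySem.Chars.splitOn.go, pvSod]
  | succ fuel ih =>
    intro l cur acc h
    cases l with
    | nil => simp [PySem.Chars.splitOn.go, pvSod]
    | cons c rest =>
      by_cases hc : c = '.'
      · subst hc
        have hpre : List.isPrefixOf ['.'] ('.' :: rest) = true := by
          simp [List.isPrefixOf]
        rw [PySem.Chars.splitOn.go]
        simp only [hpre, if_pos]
        rw [ih _ _ _ (by simpa using Nat.le_of_succ_le_succ h)]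
        simp [sod_dot]
      · have hpre : List.isPrefixOf ['.'] (c :: rest) = false := by
          simp only [List.isPrefixOf, List.isPrefixOf_nil_left, Bool.and_true, beq_eq_false_iff_ne]
          exact fun h' => hc h'.symm
        rw [PySem.Chars.splitOn.go]
        simp only [hpre, Bool.false_eq_true, if_false]
        rw [ih _ _ _ (by simpa using Nat.le_of_succ_le_succ h)]
        rw [sod_nondot _ _ hc]
        simp

lemma splitOn_eq_sod (cs : List Char) : PySem.Chars.splitOn cs ['.'] = pvSod [] cs := by
  unfold PySem.Chars.splitOn
  rw [go_spec (cs.length + 1) cs [] [] (by omega)]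
  simp

lemma sod_ne_nil : ∀ (cs pre : List Char), pvSod pre cs ≠ [] := by
  intro cs
  induction cs with
  | nil => intro pre; simp [pvSod]
  | cons c rest ih =>
    intro pre
    by_cases hc : c = '.'
    · subst hc; simp [sod_dot]
    · rw [sod_nondot _ _ hc]; exact ih (pre ++ [c])

lemma sod_pre : ∀ (cs pre p : List Char) (ps : List (List Char)),
    pvSod [] cs = p :: ps → pvSod pre cs = (pre ++ p) :: ps := by
  intro cs
  induction cs with
  | nil =>
    intro pre p ps h
    simp only [pvSod] at h
    injection h with h1 h2
    subst h1; subst h2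
    simp [pvSod]
  | cons c rest ih =>
    intro pre p ps h
    by_cases hc : c = '.'
    · subst hc
      rw [sod_dot] at h ⊢
      injection h with h1 h2
      subst h1; subst h2
      simp
    · rw [sod_nondot _ _ hc] at h ⊢
      cases hrest : pvSod [] rest with
      | nil => exact absurd hrest (sod_ne_nil rest [])
      | cons q qs =>
        have h1 : pvSod [c] rest = ([c] ++ q) :: qs := ih [c] q qs hrest
        rw [show ([] ++ [c] : List Char) = [c] by simp, h1] at h
        injection h with hA hB
        rw [ih (pre ++ [c]) q qs hrest, ← hA, ← hB]
        simp

-- the joined result as a function of the run lengths: first run length n, remaining parts ps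
def pvH : Nat → List (List Char) → Option (List Char)
  | n, [] => if n % 2 = 1 then none else some (tilesB n)
  | n, p :: ps => if n % 2 = 1 then none else (pvH p.length ps).map (fun r => tilesB n ++ '.' :: r)

-- A's per-part entry is tilesB of the part's length
lemma entry_eq (n : Nat) :
    (if n % 4 = 2 then pvRep ['A','A','A','A'] (n / 4) ++ ['B','B']
     else pvRep ['A','A','A','A'] (n / 4)) = tilesB n := by
  unfold tilesB
  split_ifs <;> simp

-- one-step unfoldings of A's loop
lemma aloop_empty_part (acc : List (List Char)) (ps : List (List Char)) :
    coverALoop acc ([] :: ps) = coverALoop (acc ++ [[]]) ps := by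
  simp [coverALoop]

lemma aloop_odd {p : List Char} (acc : List (List Char)) (ps : List (List Char))
    (hp : p ≠ []) (ho : p.length % 2 = 1) : coverALoop acc (p :: ps) = none := by
  simp [coverALoop, hp, ho]

lemma aloop_even {p : List Char} (acc : List (List Char)) (ps : List (List Char))
    (hp : p ≠ []) (ho : ¬ p.length % 2 = 1) :
    coverALoop acc (p :: ps) = coverALoop (acc ++ [tilesB p.length]) ps := by
  simp only [coverALoop, if_neg hp, if_neg ho]
  rw [entry_eq]

-- one-step unfoldings of B's loop
lemma bloop_dot (cs : List Char) (pieces : List (List Char)) (run : Nat) :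
    coverBLoop ('.' :: cs) pieces run =
      if run % 2 = 1 then none else coverBLoop cs ((pieces ++ [tilesB run]) ++ [['.']]) 0 := by
  simp [coverBLoop]

lemma bloop_nondot (cs : List Char) (pieces : List (List Char)) (run : Nat) {c : Char}
    (hc : c ≠ '.') : coverBLoop (c :: cs) pieces run = coverBLoop cs pieces (run + 1) := by
  simp [coverBLoop, hc]

lemma coverALoop_factor : ∀ (ps : List (List Char)) (acc : List (List Char)),
    coverALoop acc ps = (coverALoop [] ps).map (fun r => acc ++ r) := by
  intro ps
  induction ps with
  | nil => intro acc; simp [coverALoop]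
  | cons p ps ih =>
    intro acc
    by_cases hp : p = []
    · subst hp
      rw [aloop_empty_part, aloop_empty_part]
      rw [ih (acc ++ [[]]), ih ([] ++ [[]])]
      cases coverALoop [] ps <;> simp
    · by_cases ho : p.length % 2 = 1
      · rw [aloop_odd acc ps hp ho, aloop_odd [] ps hp ho]; simp
      · rw [aloop_even acc ps hp ho, aloop_even [] ps hp ho]
        rw [ih (acc ++ [tilesB p.length]), ih ([] ++ [tilesB p.length])]
        cases coverALoop [] ps <;> simp

lemma join_nil_cons (x : List Char) (l : List (List Char)) :
    PySem.Chars.join [] (x :: l) = x ++ PySem.Chars.join [] l := by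
  cases l <;> simp [PySem.Chars.join, List.intercalate]

lemma join_dot_cons_cons (x y : List Char) (l : List (List Char)) :
    PySem.Chars.join ['.'] (x :: y :: l) = x ++ '.' :: PySem.Chars.join ['.'] (y :: l) := by
  simp [PySem.Chars.join, List.intercalate]

lemma coverBLoop_factor : ∀ (cs : List Char) (pieces : List (List Char)) (run : Nat),
    coverBLoop cs pieces run = (coverBLoop cs [] run).map (fun r => pieces ++ r) := by
  intro cs
  induction cs with
  | nil => intro pieces run; by_cases h : run % 2 = 1 <;> simp [coverBLoop, h]
  | cons c cs ih =>
    intro pieces run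
    by_cases hc : c = '.'
    · subst hc
      rw [bloop_dot, bloop_dot]
      by_cases h : run % 2 = 1
      · simp [h]
      · simp only [if_neg h]
        rw [ih (([] ++ [tilesB run]) ++ [['.']]), ih ((pieces ++ [tilesB run]) ++ [['.']])]
        cases coverBLoop cs [] 0 <;> simp
    · rw [bloop_nondot _ _ _ hc, bloop_nondot _ _ _ hc]
      exact ih pieces (run + 1)

-- a successful run of A's loop on a nonempty parts list yields a nonempty result
lemma aloop_some_ne_nil {ps : List (List Char)} {p : List Char} {r : List (List Char)}
    (h : coverALoop [] (p :: ps) = some r) : r ≠ [] := by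
  by_cases hp : p = []
  · subst hp
    rw [aloop_empty_part, coverALoop_factor] at h
    cases hps : coverALoop [] ps with
    | none => rw [hps] at h; simp at h
    | some a =>
      rw [hps] at h
      simp only [Option.map_some, Option.some.injEq] at h
      simp [← h]
  · by_cases ho : p.length % 2 = 1
    · rw [aloop_odd [] ps hp ho] at h; simp at h
    · rw [aloop_even [] ps hp ho, coverALoop_factor] at h
      cases hps : coverALoop [] ps with
      | none => rw [hps] at h; simp at h
      | some a =>
        rw [hps] at h
        simp only [Option.map_some, Option.some.injEq] at h
        simp [← h]

lemma A_join : ∀ (ps : List (List Char)) (p : List Char),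
    (coverALoop [] (p :: ps)).map (PySem.Chars.join ['.']) = pvH p.length ps := by
  intro ps
  induction ps with
  | nil =>
    intro p
    by_cases hp : p = []
    · subst hp
      rw [aloop_empty_part]
      simp [coverALoop, pvH, tilesB, pvRep, PySem.Chars.join, List.intercalate]
    · by_cases ho : p.length % 2 = 1
      · rw [aloop_odd [] [] hp ho]; simp [pvH, ho]
      · rw [aloop_even [] [] hp ho]
        simp [coverALoop, pvH, ho, PySem.Chars.join, List.intercalate]
  | cons q ps ih =>
    intro p
    have step : ∀ (e : List Char),
        (coverALoop [e] (q :: ps)).map (PySem.Chars.join ['.']) =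
          (pvH q.length ps).map (fun r => e ++ '.' :: r) := by
      intro e
      rw [coverALoop_factor]
      rw [← ih q]
      cases h : coverALoop [] (q :: ps) with
      | none => simp
      | some r =>
        cases r with
        | nil => exact absurd rfl (aloop_some_ne_nil h)
        | cons y r' =>
          simp only [Option.map_some, Option.some.injEq, List.singleton_append]
          exact join_dot_cons_cons e y r'
    by_cases hp : p = []
    · subst hp
      rw [aloop_empty_part]
      rw [show (([] : List (List Char)) ++ [[]]) = [[]] by simp, step []]
      have h0 : tilesB 0 = [] := by simp [tilesB, pvRep]
      simp [pvH, h0]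
    · by_cases ho : p.length % 2 = 1
      · rw [aloop_odd [] (q :: ps) hp ho]; simp [pvH, ho]
      · rw [aloop_even [] (q :: ps) hp ho]
        rw [show ([] ++ [tilesB p.length]) = [tilesB p.length] by simp]
        rw [step (tilesB p.length)]
        simp [pvH, ho]

lemma B_main : ∀ (cs : List Char) (run : Nat) (p : List Char) (ps : List (List Char)),
    pvSod [] cs = p :: ps →
    (coverBLoop cs [] run).map (PySem.Chars.join []) = pvH (run + p.length) ps := by
  intro cs
  induction cs with
  | nil =>
    intro run p ps h
    simp only [pvSod] at h
    injection h with h1 h2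
    subst h2
    rw [← h1]
    by_cases ho : run % 2 = 1 <;>
      simp [coverBLoop, pvH, ho, join_nil_cons, PySem.Chars.join, List.intercalate]
  | cons c cs ih =>
    intro run p ps h
    by_cases hc : c = '.'
    · subst hc
      rw [sod_dot] at h
      injection h with h1 h2
      subst h2
      rw [← h1]
      rw [bloop_dot]
      cases hrest : pvSod [] cs with
      | nil => exact absurd hrest (sod_ne_nil cs [])
      | cons q qs =>
        by_cases ho : run % 2 = 1
        · simp [pvH, ho]
        · rw [if_neg ho, coverBLoop_factor]
          have ih0 := ih 0 q qs hrest
          rw [Nat.zero_add] at ih0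
          simp only [List.length_nil, Nat.add_zero, pvH, if_neg ho]
          rw [← ih0]
          cases coverBLoop cs [] 0 with
          | none => simp
          | some r =>
            simp only [Option.map_some, Option.some.injEq]
            rw [show (([] ++ [tilesB run]) ++ [['.']] ++ r) = tilesB run :: ['.'] :: r by simp]
            rw [join_nil_cons, join_nil_cons]
            simp
    · rw [sod_nondot _ _ hc] at h
      rw [bloop_nondot _ _ _ hc]
      cases hrest : pvSod [] cs with
      | nil => exact absurd hrest (sod_ne_nil cs [])
      | cons q qs =>
        have h1 : pvSod [c] cs = ([c] ++ q) :: qs := sod_pre cs [c] q qs hrest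
        rw [show ([] ++ [c] : List Char) = [c] by simp, h1] at h
        injection h with hA hB
        subst hB
        rw [← hA]
        rw [ih (run + 1) q qs hrest]
        congr 1
        simp
        omega

-- ===== VERDICT (by name: the statement is the Claim_ definition above) =====
theorem cover_board_spec : Claim_equal_cover_board := by
  intro board _
  unfold Spec_cover_board cover_board cover_board_alt
  rw [splitOn_eq_sod]
  cases hs : pvSod [] board.toList with
  | nil => exact absurd hs (sod_ne_nil board.toList [])
  | cons p ps =>
    have hB := B_main board.toList 0 p ps hs
    rw [show (0 + p.length) = p.length by omega, ← A_join ps p] at hB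
    cases ha : coverALoop [] (p :: ps) with
    | none =>
      rw [ha] at hB
      cases hb : coverBLoop board.toList [] 0 with
      | none => rfl
      | some r => rw [hb] at hB; simp at hB
    | some ra =>
      rw [ha] at hB
      cases hb : coverBLoop board.toList [] 0 with
      | none => rw [hb] at hB; simp at hB
      | some rb =>
        rw [hb] at hB
        simp only [Option.map_some, Option.some.injEq] at hB
        show String.mk (PySem.Chars.join ['.'] ra) = String.mk (PySem.Chars.join [] rb)
        rw [hB]
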